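-- pv_equiv track=rewrite | github.com/Lightning-AI/lit-gpt | xla/finetune/adapter.py | get_max_seq_length
-- ===== SOURCE A (Python) =====
-- from typing import Dict, List, Optional, Tuple
--
-- override_max_seq_length = None
--
-- def get_max_seq_length(data: List[Dict]) -> Tuple[int, int, int]:
--     # find out the minimum max_seq_length required during fine-tuning (saves memory!)
--     lengths = [len(d["input_ids"]) for d in data]
--     max_seq_length = max(lengths)
--     longest_seq_ix = lengths.index(max_seq_length)
--     # support easy override at the top of the file
--     return (
--         override_max_seq_length if isinstance(override_max_seq_length, int) else max_seq_length,
--         max_seq_length,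
--         longest_seq_ix,
--     )
-- ===== SOURCE B (Python) =====
-- from typing import Dict, List, Optional, Tuple
--
-- override_max_seq_length = None
--
-- def get_max_seq_length(data: List[Dict]) -> Tuple[int, int, int]:
--     # single pass: track the best length and the index of its first occurrence
--     if not data:
--         raise ValueError("max() arg is an empty sequence")
--     best_len, best_ix = -1, -1
--     for ix, d in enumerate(data):
--         n = len(d["input_ids"])
--         if n > best_len:
--             best_len, best_ix = n, ix
--     return (
--         override_max_seq_length if isinstance(override_max_seq_length, int) else best_len,
--         best_len,
--         best_ix,
--     )
-- ===== Notes on version B (the rewrite author's own statement) =====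
-- stated objective: simpler
-- what changed: Replaces the three passes (build a lengths list, max() over it, lengths.index()) by one enumerate loop that keeps a running (best_len, best_ix), updating on strict '>' so the first maximum wins.
-- outside the precondition, e.g. on get_max_seq_length([]): A raises ValueError, B raises ValueError
import Mathlib
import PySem

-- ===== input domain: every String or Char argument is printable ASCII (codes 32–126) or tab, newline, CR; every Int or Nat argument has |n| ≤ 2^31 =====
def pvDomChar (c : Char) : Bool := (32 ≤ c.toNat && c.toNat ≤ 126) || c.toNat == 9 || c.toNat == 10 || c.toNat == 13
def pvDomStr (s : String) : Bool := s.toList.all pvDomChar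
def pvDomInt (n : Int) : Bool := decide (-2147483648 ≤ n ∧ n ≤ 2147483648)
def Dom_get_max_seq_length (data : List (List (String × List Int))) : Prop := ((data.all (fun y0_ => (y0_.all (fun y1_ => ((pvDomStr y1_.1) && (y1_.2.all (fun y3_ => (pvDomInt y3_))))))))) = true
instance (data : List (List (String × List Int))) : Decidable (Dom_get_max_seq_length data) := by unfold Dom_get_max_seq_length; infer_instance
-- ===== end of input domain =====

-- B replaces A's three passes (lengths list, max(), .index()) by a single running-maximum
-- loop over enumerate(data); not faster asymptotically, just one pass and O(1) extra space.

-- module constant: override_max_seq_length = None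
def override_max_seq_length : Option Int := none

-- len(d["input_ids"]) : dict lookup is first-match on the association list
def pvLen (d : List (String × List Int)) : Int := (((d.lookup "input_ids").getD []).length : Int)

-- ===== PORT A =====
def get_max_seq_length (data : List (List (String × List Int))) : Int × Int × Int :=
  let lengths : List Int := data.map pvLen
  let max_seq_length : Int := (PySem.List.max? lengths (fun x => x)).getD 0
  let longest_seq_ix : Int := ((PySem.List.index? lengths max_seq_length).getD 0 : Int)
  ((match override_max_seq_length with | some v => v | none => max_seq_length),
   max_seq_length, longest_seq_ix)

-- ===== PORT B =====
def pvStep (acc : Int × Int) (p : Int × List (String × List Int)) : Int × Int :=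
  let n := pvLen p.2
  if acc.1 < n then (n, p.1) else acc

def get_max_seq_length_alt (data : List (List (String × List Int))) : Int × Int × Int :=
  let best := (PySem.List.enumerate data 0).foldl pvStep (-1, -1)
  ((match override_max_seq_length with | some v => v | none => best.1),
   best.1, best.2)

-- ===== PRECONDITION & SPEC =====
-- Pre_ excludes exactly A's exceptions: empty data (ValueError from max([]))
-- and an element without the "input_ids" key (KeyError); B raises on the same inputs.
def Pre_get_max_seq_length (data : List (List (String × List Int))) : Prop :=
  data ≠ [] ∧ data.all (fun d => (d.lookup "input_ids").isSome)

instance (data : List (List (String × List Int))) : Decidable (Pre_get_max_seq_length data) := by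
  unfold Pre_get_max_seq_length; infer_instance

def pvWitness_get_max_seq_length : (List (List (String × List Int))) :=
  [[("input_ids", [1, 2])], [("input_ids", [3])]]

def Spec_get_max_seq_length (data : List (List (String × List Int))) (out : Int × Int × Int) : Prop := out = get_max_seq_length_alt data
instance (data : List (List (String × List Int))) (out : Int × Int × Int) : Decidable (Spec_get_max_seq_length data out) := by unfold Spec_get_max_seq_length; infer_instance

-- ===== CLAIM (what is proved, stated in full; the proofs are below) =====
def Claim_equal_get_max_seq_length : Prop := ∀ (data : List (List (String × List Int))), Dom_get_max_seq_length data → Pre_get_max_seq_length data → Spec_get_max_seq_length data (get_max_seq_length data)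

-- ===== LEMMAS AND PROOFS =====

-- idxOf? is some idxOf on a member (specific to Int; not found in the library)
theorem pvIdxOf?_eq_some (m : Int) (l : List Int) (h : m ∈ l) :
    List.idxOf? m l = some (List.idxOf m l) := by
  induction l with
  | nil => cases h
  | cons x t ih =>
    by_cases hx : x = m
    · subst hx; simp [List.idxOf?, List.idxOf, List.findIdx?_cons, List.findIdx_cons]
    · have hm : m ∈ t := (List.mem_cons.mp h).resolve_left (fun e => hx e.symm)
      simp [List.idxOf?_cons, hx, ih hm]

-- pulling a max through a running foldl max
theorem pvFoldlMaxMax (t : List Int) : ∀ (a b : Int), t.foldl max (max a b) = max a (t.foldl max b) := by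
  induction t with
  | nil => intro a b; rfl
  | cons c t ih =>
    intro a b
    simp only [List.foldl_cons, max_assoc]
    exact ih a (max b c)

-- the single-pass running-max loop on Int pairs computes the maximum and its first index
theorem pvIntLoop (l : List Int) :
    ∀ (s bl bi : Int),
      (PySem.List.enumerate l s).foldl (fun acc p => if acc.1 < p.2 then (p.2, p.1) else acc) (bl, bi)
      = match PySem.List.max? l (fun x => x) with
        | none => (bl, bi)
        | some m => if bl < m then (m, s + (l.idxOf m : Int)) else (bl, bi) := by
  induction l with
  | nil =>
    intro s bl bi
    simp [PySem.List.enumerate_nil, PySem.List.max?]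
  | cons x t ih =>
    intro s bl bi
    rw [PySem.List.enumerate_cons, List.foldl_cons, PySem.List.max?_id_cons]
    by_cases hbx : bl < x
    · simp only [hbx, if_pos, ih]
      cases t with
      | nil => simp [PySem.List.max?, hbx]
      | cons y t' =>
        rw [PySem.List.max?_id_cons]
        simp only [List.foldl_cons, pvFoldlMaxMax]
        by_cases hxm : x < t'.foldl max y
        · have hne : x ≠ t'.foldl max y := ne_of_lt hxm
          rw [if_pos hxm, if_pos (lt_of_lt_of_le hbx (le_max_left _ _)),
              max_eq_right (le_of_lt hxm), List.idxOf_cons_ne _ hne]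
          push_cast; ring_nf
        · rw [if_neg hxm, max_eq_left (not_lt.mp hxm),
              if_pos hbx, List.idxOf_cons_self]
          simp
    · simp only [hbx, if_false, ih]
      cases t with
      | nil => simp [PySem.List.max?, hbx]
      | cons y t' =>
        rw [PySem.List.max?_id_cons]
        simp only [List.foldl_cons, pvFoldlMaxMax]
        by_cases hbm : bl < t'.foldl max y
        · have hxm : x < t'.foldl max y := lt_of_le_of_lt (not_lt.mp hbx) hbm
          rw [if_pos hbm, if_pos (lt_of_lt_of_le hbm (le_max_right _ _)),
              max_eq_right (le_of_lt hxm), List.idxOf_cons_ne _ (ne_of_lt hxm)]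
          push_cast; ring_nf
        · rw [if_neg hbm]
          rw [if_neg (by
            intro h
            rcases lt_max_iff.mp h with h1 | h2
            · exact hbx h1
            · exact hbm h2)]

-- enumerate commutes with map on the payload
theorem pvEnumerateMap (l : List (List (String × List Int))) :
    ∀ (s : Int), PySem.List.enumerate (l.map pvLen) s
      = (PySem.List.enumerate l s).map (fun p => (p.1, pvLen p.2)) := by
  induction l with
  | nil => intro s; simp [PySem.List.enumerate_nil]
  | cons x t ih => intro s; simp [PySem.List.enumerate_cons, ih]

-- B's loop, phrased against A's intermediate lengths list
theorem pvStep_foldl (data : List (List (String × List Int))) (s bl bi : Int) :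
    (PySem.List.enumerate data s).foldl pvStep (bl, bi)
    = match PySem.List.max? (data.map pvLen) (fun x => x) with
      | none => (bl, bi)
      | some m => if bl < m then (m, s + ((data.map pvLen).idxOf m : Int)) else (bl, bi) := by
  rw [← pvIntLoop (data.map pvLen) s bl bi, pvEnumerateMap, List.foldl_map]
  rfl

-- ===== VERDICT (by name: the statement is the Claim_ definition above) =====
theorem get_max_seq_length_spec : Claim_equal_get_max_seq_length := by
  intro data _ hpre
  obtain ⟨hne, _⟩ := hpre
  unfold Spec_get_max_seq_length get_max_seq_length get_max_seq_length_alt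
  rw [pvStep_foldl]
  rcases hm : PySem.List.max? (data.map pvLen) (fun x => x) with _ | m
  · exact absurd (List.map_eq_nil_iff.mp ((PySem.List.max?_eq_none_iff _ _).mp hm)) hne
  · have hmem : m ∈ data.map pvLen := PySem.List.max?_mem hm
    have hm0 : 0 ≤ m := by
      rcases List.mem_map.mp hmem with ⟨d, _, hd⟩
      simp [← hd, pvLen]
    simp [override_max_seq_length, hm, pvIdxOf?_eq_some m _ hmem, show (-1:Int) < m by omega]
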